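-- pv_equiv track=rewrite | github.com/camipozas/facturacion_dimerc | match_1_M_aux.py | calcular_n_max
-- ===== SOURCE A (Python) =====
-- def choose(n, k):
--     """
--     Retorna el número combinatorio "n sobre k".
--     """
--     resultado = 1
--     for i in range(1, k+1):
--         resultado *= (n-i+1)
--         resultado //= i
--     return resultado
--
-- def calcular_n_max(largo):
--     """
--     Calcula la cantidad máxima de elementos por combinación (n_max)
--     a realizar en un arreglo de largo "largo".
--
--     Si hay un arreglo con 800 elementos, no es posible realizar
--     todas las 2^800 combinaciones de esos elementos. Idealmente, se
--     deberían realizar menos de 100.000 combinaciones por arreglo para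
--     evitar que el programa se demore demasiado tiempo en ejecutar.
--
--     Para un arreglo con 800 elementos, por ejemplo, no se deberían
--     realizar combinaciones de más de 2 elementos. En ese caso, el
--     valor retornado por esta función sería n_max = 2.
--
--     Pero para un arreglo con 15 elementos, es perfectamente viable
--     hacer las 2^15 combinaciones, así que n_max = 15.
--     """
--
--     if largo <= 2:
--         return largo
--
--     n_max = 2
--     while n_max < largo:
--         if choose(largo, n_max) > 1000000:
--             return n_max - 1
--         n_max += 1
--
--     return n_max
-- ===== SOURCE B (Python) =====
-- def calcular_n_max(largo):
--     if largo <= 2: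
--         return largo
--     # incremental binomial: c == choose(largo, n) throughout the loop
--     c = largo * (largo - 1) // 2
--     n = 2
--     while n < largo:
--         if c > 1000000:
--             return n - 1
--         c = c * (largo - n) // (n + 1)
--         n += 1
--     return largo
-- ===== Notes on version B (the rewrite author's own statement) =====
-- stated objective: faster
-- what changed: Replaces the from-scratch choose(largo, n_max) product loop recomputed on every iteration by a single running binomial value updated incrementally with one multiply and one exact floor division per step.
import Mathlib
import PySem

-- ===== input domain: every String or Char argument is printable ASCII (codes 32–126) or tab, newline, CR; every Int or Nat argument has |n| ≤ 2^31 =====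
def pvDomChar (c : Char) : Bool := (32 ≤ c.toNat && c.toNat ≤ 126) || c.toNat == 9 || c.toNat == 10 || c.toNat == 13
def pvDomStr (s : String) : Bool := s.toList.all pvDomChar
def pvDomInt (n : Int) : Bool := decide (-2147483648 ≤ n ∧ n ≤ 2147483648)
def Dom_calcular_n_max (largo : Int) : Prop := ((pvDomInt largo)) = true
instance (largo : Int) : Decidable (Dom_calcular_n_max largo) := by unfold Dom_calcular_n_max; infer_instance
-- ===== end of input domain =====

-- B replaces A's per-iteration from-scratch choose(largo, n_max) recomputation by one
-- running binomial value updated incrementally each step (objective: faster, constant-factor).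


-- ===== PORT A =====
-- choose(n, k): resultado accumulates over i in range(1, k+1)
def chooseP (n k : Int) : Int :=
  (PySem.List.pyRange 1 (k+1) 1).foldl
    (fun resultado i => PySem.Int.floordiv (resultado * (n - i + 1)) i) 1

-- the 'while n_max < largo' loop of A
def loopA (largo n_max : Int) : Int :=
  if n_max < largo then
    if chooseP largo n_max > 1000000 then n_max - 1
    else loopA largo (n_max + 1)
  else n_max
termination_by (largo - n_max).toNat
decreasing_by omega

def calcular_n_max (largo : Int) : Int :=
  if largo ≤ 2 then largo else loopA largo 2

-- ===== PORT B =====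
-- the 'while n < largo' loop of B, carrying the running binomial c
def loopB (largo n c : Int) : Int :=
  if n < largo then
    if c > 1000000 then n - 1
    else loopB largo (n + 1) (PySem.Int.floordiv (c * (largo - n)) (n + 1))
  else largo
termination_by (largo - n).toNat
decreasing_by omega

def calcular_n_max_alt (largo : Int) : Int :=
  if largo ≤ 2 then largo
  else loopB largo 2 (PySem.Int.floordiv (largo * (largo - 1)) 2)

-- ===== PRECONDITION & SPEC =====
def Spec_calcular_n_max (largo : Int) (out : Int) : Prop := out = calcular_n_max_alt largo
instance (largo : Int) (out : Int) : Decidable (Spec_calcular_n_max largo out) := by unfold Spec_calcular_n_max; infer_instance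

-- ===== CLAIM (what is proved, stated in full; the proofs are below) =====
def Claim_equal_calcular_n_max : Prop := ∀ (largo : Int), Dom_calcular_n_max largo → Spec_calcular_n_max largo (calcular_n_max largo)

-- ===== LEMMAS AND PROOFS =====

-- one extra factor of A's choose product = exactly B's incremental update
theorem chooseP_step (N k : Int) (hk : 0 ≤ k) :
    chooseP N (k+1) = PySem.Int.floordiv (chooseP N k * (N - k)) (k+1) := by
  unfold chooseP
  rw [show k + 1 + 1 = (k + 1) + 1 by ring,
      PySem.List.pyRange_one_succ_right (by omega : (1:Int) ≤ k + 1),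
      List.foldl_append]
  simp only [List.foldl_cons, List.foldl_nil]
  congr 1
  ring

-- B's initial value is chooseP largo 2
theorem chooseP_two (N : Int) :
    chooseP N 2 = PySem.Int.floordiv (N * (N - 1)) 2 := by
  unfold chooseP
  rw [show PySem.List.pyRange 1 (2+1) 1 = [1, 2] from by decide]
  simp only [List.foldl_cons, List.foldl_nil]
  rw [PySem.Int.floordiv_eq_ediv_of_pos (by norm_num : (0:Int) < 1)]
  norm_num
  ring_nf

-- loop invariant: B's carried c equals chooseP largo n
theorem loop_eq (largo : Int) : ∀ (m : Nat) (n : Int), (largo - n).toNat = m →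
    n ≤ largo → 0 ≤ n → loopA largo n = loopB largo n (chooseP largo n) := by
  intro m
  induction m with
  | zero =>
    intro n hm hle _
    have hn : n = largo := by omega
    rw [loopA, loopB]
    simp [hn]
  | succ m ih =>
    intro n hm hle hn
    have hlt : n < largo := by omega
    rw [loopA, loopB]
    simp only [if_pos hlt]
    by_cases hc : chooseP largo n > 1000000
    · simp [hc]
    · simp only [if_neg hc]
      rw [← chooseP_step largo n hn]
      exact ih (n+1) (by omega) (by omega) (by omega)

-- ===== VERDICT (by name: the statement is the Claim_ definition above) =====
theorem calcular_n_max_spec : Claim_equal_calcular_n_max := by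
  intro largo _
  unfold Spec_calcular_n_max calcular_n_max calcular_n_max_alt
  by_cases h : largo ≤ 2
  · simp [h]
  · simp only [if_neg h]
    rw [← chooseP_two largo]
    exact loop_eq largo (largo - 2).toNat 2 rfl (by omega) (by omega)
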